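-- pv_equiv track=rewrite | github.com/Cheereus/PythonMemory | LaoJiu/20200720.py | allFactor
-- ===== SOURCE A (Python) =====
-- def allFactor(n):
--   fList = [] # 定义一个列表存放因子
--   for i in range(1, n): # 遍历整除
--     if n % i == 0:
--       fList.append(i) # 如果是因子就加进列表
--       continue
--     else:
--       pass
--   return fList
-- ===== SOURCE B (Python) =====
-- def allFactor(n):
--     if n <= 1:
--         return []
--     small = []
--     large = []
--     i = 1
--     while i * i <= n:
--         if n % i == 0:
--             small.append(i)
--             j = n // i
--             if j != i and j != n:
--                 large.append(j)
--         i += 1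
--     return small + large[::-1]
-- ===== Notes on version B (the rewrite author's own statement) =====
-- stated objective: faster
-- what changed: B trial-divides only up to sqrt(n), collecting each divisor i together with its cofactor n//i, and returns the small divisors followed by the reversed cofactors instead of scanning every i in range(1, n).
import Mathlib
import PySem

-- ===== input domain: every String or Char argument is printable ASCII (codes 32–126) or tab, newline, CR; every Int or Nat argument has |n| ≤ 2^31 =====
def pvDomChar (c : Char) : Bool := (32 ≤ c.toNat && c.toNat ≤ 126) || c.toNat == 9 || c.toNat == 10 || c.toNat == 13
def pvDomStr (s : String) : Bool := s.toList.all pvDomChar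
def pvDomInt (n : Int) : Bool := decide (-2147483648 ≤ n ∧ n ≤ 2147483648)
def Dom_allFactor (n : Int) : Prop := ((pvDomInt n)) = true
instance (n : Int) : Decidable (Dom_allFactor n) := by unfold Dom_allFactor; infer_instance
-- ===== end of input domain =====

-- B replaces A's full scan of range(1, n) by trial division up to √n with divisor/cofactor pairs (objective: faster).

-- ===== PORT A =====
def allFactor (n : Int) : List Int :=
  (PySem.List.pyRange 1 n 1).foldl
    (fun fList i => if PySem.Int.mod n i = 0 then fList ++ [i] else fList) []

-- ===== PORT B =====
-- while i * i <= n: …  (the '1 ≤ i' conjunct is a totality guard; the loop starts at i = 1 and only increments)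
def allFactorLoop (n i : Int) (small large : List Int) : List Int :=
  if h : 1 ≤ i ∧ i * i ≤ n then
    if PySem.Int.mod n i = 0 then
      let j := PySem.Int.floordiv n i
      if j ≠ i ∧ j ≠ n then
        allFactorLoop n (i + 1) (small ++ [i]) (large ++ [j])
      else
        allFactorLoop n (i + 1) (small ++ [i]) large
    else
      allFactorLoop n (i + 1) small large
  else
    small ++ large.reverse
termination_by (n + 1 - i).toNat
decreasing_by
  all_goals obtain ⟨h1, h2⟩ := h
  all_goals have hin : i ≤ n := by nlinarith
  all_goals omega

def allFactor_alt (n : Int) : List Int :=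
  if n ≤ 1 then [] else allFactorLoop n 1 [] []

-- ===== PRECONDITION & SPEC =====
def Spec_allFactor (n : Int) (out : List Int) : Prop := out = allFactor_alt n
instance (n : Int) (out : List Int) : Decidable (Spec_allFactor n out) := by unfold Spec_allFactor; infer_instance

-- ===== CLAIM (what is proved, stated in full; the proofs are below) =====
def Claim_equal_allFactor : Prop := ∀ (n : Int), Dom_allFactor n → Spec_allFactor n (allFactor n)

-- ===== LEMMAS AND PROOFS =====

-- the ascending small divisors collected from index i upward
def smalls (n i : Int) : List Int :=
  if h : 1 ≤ i ∧ i * i ≤ n then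
    if PySem.Int.mod n i = 0 then i :: smalls n (i + 1) else smalls n (i + 1)
  else []
termination_by (n + 1 - i).toNat
decreasing_by
  all_goals obtain ⟨h1, h2⟩ := h
  all_goals have hin : i ≤ n := by nlinarith
  all_goals omega

-- the cofactors collected from index i upward (in order of i, i.e. descending values)
def larges (n i : Int) : List Int :=
  if h : 1 ≤ i ∧ i * i ≤ n then
    if PySem.Int.mod n i = 0 ∧ PySem.Int.floordiv n i ≠ i ∧ PySem.Int.floordiv n i ≠ n then
      PySem.Int.floordiv n i :: larges n (i + 1)
    else larges n (i + 1)
  else []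
termination_by (n + 1 - i).toNat
decreasing_by
  all_goals obtain ⟨h1, h2⟩ := h
  all_goals have hin : i ≤ n := by nlinarith
  all_goals omega

theorem allFactorLoop_eq_aux (n : Int) (k : Nat) : ∀ (i : Int) (small large : List Int),
    (n + 1 - i).toNat ≤ k →
    allFactorLoop n i small large = (small ++ smalls n i) ++ (large ++ larges n i).reverse := by
  induction k with
  | zero =>
      intro i small large hk
      have hg : ¬ (1 ≤ i ∧ i * i ≤ n) := by
        rintro ⟨h1, h2⟩
        have : i ≤ n := by nlinarith
        omega
      rw [allFactorLoop, smalls, larges, dif_neg hg, dif_neg hg, dif_neg hg]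
      simp
  | succ k ih =>
      intro i small large hk
      rw [allFactorLoop, smalls, larges]
      by_cases hg : 1 ≤ i ∧ i * i ≤ n
      · have hmeas : (n + 1 - (i + 1)).toNat ≤ k := by
          have : i ≤ n := by nlinarith [hg.1, hg.2]
          omega
        rw [dif_pos hg, dif_pos hg, dif_pos hg]
        by_cases hmod : PySem.Int.mod n i = 0
        · rw [if_pos hmod]
          by_cases hj : PySem.Int.floordiv n i ≠ i ∧ PySem.Int.floordiv n i ≠ n
          · rw [if_pos hj, ih _ _ _ hmeas]
            simp [hmod, hj.1, hj.2]
          · rw [if_neg hj, ih _ _ _ hmeas]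
            have hne : ¬ (PySem.Int.mod n i = 0 ∧ PySem.Int.floordiv n i ≠ i ∧ PySem.Int.floordiv n i ≠ n) :=
              fun hc => hj ⟨hc.2.1, hc.2.2⟩
            rw [if_pos hmod, if_neg hne]
            simp
        · rw [if_neg hmod, ih _ _ _ hmeas]
          have hne : ¬ (PySem.Int.mod n i = 0 ∧ PySem.Int.floordiv n i ≠ i ∧ PySem.Int.floordiv n i ≠ n) :=
              fun hc => hmod hc.1
          rw [if_neg hne]
          simp [hmod]

      · rw [dif_neg hg, dif_neg hg, dif_neg hg]
        simp

theorem allFactorLoop_eq (n i : Int) (small large : List Int) :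
    allFactorLoop n i small large = (small ++ smalls n i) ++ (large ++ larges n i).reverse :=
  allFactorLoop_eq_aux n (n + 1 - i).toNat i small large le_rfl

theorem mem_smalls_aux (n : Int) (k : Nat) : ∀ i d : Int, (n + 1 - i).toNat ≤ k → 1 ≤ i →
    (d ∈ smalls n i ↔ i ≤ d ∧ d * d ≤ n ∧ PySem.Int.mod n d = 0) := by
  induction k with
  | zero =>
    intro i d hk hi
    have hg : ¬ (1 ≤ i ∧ i * i ≤ n) := by
      rintro ⟨h1, h2⟩
      have : i ≤ n := by nlinarith
      omega
    rw [smalls, dif_neg hg]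
    simp only [List.not_mem_nil, false_iff]
    rintro ⟨hd1, hd2, hd3⟩
    have hii : ¬ i * i ≤ n := fun h => hg ⟨hi, h⟩
    nlinarith
  | succ k ih =>
    intro i d hk hi
    rw [smalls]
    by_cases hg : 1 ≤ i ∧ i * i ≤ n
    · have hmeas : (n + 1 - (i + 1)).toNat ≤ k := by
        have : i ≤ n := by nlinarith [hg.1, hg.2]
        omega
      rw [dif_pos hg]
      have IH := ih (i + 1) d hmeas (by omega)
      by_cases hmod : PySem.Int.mod n i = 0
      · rw [if_pos hmod]
        simp only [List.mem_cons, IH]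
        constructor
        · rintro (rfl | ⟨h1, h2, h3⟩)
          · exact ⟨le_refl _, hg.2, hmod⟩
          · exact ⟨by omega, h2, h3⟩
        · rintro ⟨h1, h2, h3⟩
          by_cases hdi : d = i
          · exact Or.inl hdi
          · exact Or.inr ⟨by omega, h2, h3⟩
      · rw [if_neg hmod, IH]
        constructor
        · rintro ⟨h1, h2, h3⟩; exact ⟨by omega, h2, h3⟩
        · rintro ⟨h1, h2, h3⟩
          by_cases hdi : d = i
          · subst hdi; exact absurd h3 hmod
          · exact ⟨by omega, h2, h3⟩
    · rw [dif_neg hg]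
      simp only [List.not_mem_nil, false_iff]
      rintro ⟨hd1, hd2, hd3⟩
      have hii : ¬ i * i ≤ n := fun h => hg ⟨hi, h⟩
      nlinarith

theorem mem_smalls {n i d : Int} (hi : 1 ≤ i) :
    d ∈ smalls n i ↔ i ≤ d ∧ d * d ≤ n ∧ PySem.Int.mod n d = 0 :=
  mem_smalls_aux n (n + 1 - i).toNat i d le_rfl hi

theorem mem_larges_aux (n : Int) (k : Nat) : ∀ i d : Int, (n + 1 - i).toNat ≤ k → 1 ≤ i →
    (d ∈ larges n i ↔ ∃ e, i ≤ e ∧ e * e ≤ n ∧ PySem.Int.mod n e = 0 ∧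
      PySem.Int.floordiv n e = d ∧ d ≠ e ∧ d ≠ n) := by
  induction k with
  | zero =>
    intro i d hk hi
    have hg : ¬ (1 ≤ i ∧ i * i ≤ n) := by
      rintro ⟨h1, h2⟩
      have : i ≤ n := by nlinarith
      omega
    rw [larges, dif_neg hg]
    simp only [List.not_mem_nil, false_iff]
    rintro ⟨e, he1, he2, -⟩
    have hii : ¬ i * i ≤ n := fun h => hg ⟨hi, h⟩
    nlinarith
  | succ k ih =>
    intro i d hk hi
    rw [larges]
    by_cases hg : 1 ≤ i ∧ i * i ≤ n
    · have hmeas : (n + 1 - (i + 1)).toNat ≤ k := by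
        have : i ≤ n := by nlinarith [hg.1, hg.2]
        omega
      rw [dif_pos hg]
      have IH := ih (i + 1) d hmeas (by omega)
      by_cases hc : PySem.Int.mod n i = 0 ∧ PySem.Int.floordiv n i ≠ i ∧ PySem.Int.floordiv n i ≠ n
      · rw [if_pos hc]
        simp only [List.mem_cons, IH]
        constructor
        · rintro (rfl | ⟨e, he1, he2, he3, he4, he5, he6⟩)
          · exact ⟨i, le_refl _, hg.2, hc.1, rfl, hc.2.1, hc.2.2⟩
          · exact ⟨e, by omega, he2, he3, he4, he5, he6⟩
        · rintro ⟨e, he1, he2, he3, he4, he5, he6⟩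
          by_cases hei : e = i
          · subst hei; exact Or.inl he4.symm
          · exact Or.inr ⟨e, by omega, he2, he3, he4, he5, he6⟩
      · rw [if_neg hc, IH]
        constructor
        · rintro ⟨e, he1, he2, he3, he4, he5, he6⟩
          exact ⟨e, by omega, he2, he3, he4, he5, he6⟩
        · rintro ⟨e, he1, he2, he3, he4, he5, he6⟩
          by_cases hei : e = i
          · subst hei
            exact absurd ⟨he3, he4 ▸ he5, he4 ▸ he6⟩ hc
          · exact ⟨e, by omega, he2, he3, he4, he5, he6⟩
    · rw [dif_neg hg]
      simp only [List.not_mem_nil, false_iff]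
      rintro ⟨e, he1, he2, -⟩
      have hii : ¬ i * i ≤ n := fun h => hg ⟨hi, h⟩
      nlinarith

theorem mem_larges {n i d : Int} (hi : 1 ≤ i) :
    d ∈ larges n i ↔ ∃ e, i ≤ e ∧ e * e ≤ n ∧ PySem.Int.mod n e = 0 ∧
      PySem.Int.floordiv n e = d ∧ d ≠ e ∧ d ≠ n :=
  mem_larges_aux n (n + 1 - i).toNat i d le_rfl hi

theorem pairwise_smalls_aux (n : Int) (k : Nat) : ∀ i : Int, (n + 1 - i).toNat ≤ k → 1 ≤ i →
    (smalls n i).Pairwise (· < ·) := by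
  induction k with
  | zero =>
    intro i hk hi
    have hg : ¬ (1 ≤ i ∧ i * i ≤ n) := by
      rintro ⟨h1, h2⟩
      have : i ≤ n := by nlinarith
      omega
    rw [smalls, dif_neg hg]
    exact List.Pairwise.nil
  | succ k ih =>
    intro i hk hi
    rw [smalls]
    by_cases hg : 1 ≤ i ∧ i * i ≤ n
    · have hmeas : (n + 1 - (i + 1)).toNat ≤ k := by
        have : i ≤ n := by nlinarith [hg.1, hg.2]
        omega
      rw [dif_pos hg]
      have IH := ih (i + 1) hmeas (by omega)
      by_cases hmod : PySem.Int.mod n i = 0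
      · rw [if_pos hmod]
        refine List.pairwise_cons.mpr ⟨?_, IH⟩
        intro d hd
        have := (mem_smalls (by omega : (1:Int) ≤ i + 1)).mp hd
        omega
      · rw [if_neg hmod]; exact IH
    · rw [dif_neg hg]; exact List.Pairwise.nil

theorem pairwise_smalls (n i : Int) (hi : 1 ≤ i) : (smalls n i).Pairwise (· < ·) :=
  pairwise_smalls_aux n (n + 1 - i).toNat i le_rfl hi

-- a collected cofactor is a true cofactor: d * e = n with i ≤ e, e * e ≤ n, d ≠ e, d ≠ n
theorem larges_fact {n i d : Int} (hi : 1 ≤ i) (hd : d ∈ larges n i) :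
    ∃ e, i ≤ e ∧ e * e ≤ n ∧ d * e = n ∧ d ≠ e ∧ d ≠ n := by
  obtain ⟨e, he1, he2, he3, he4, he5, he6⟩ := (mem_larges hi).mp hd
  refine ⟨e, he1, he2, ?_, he5, he6⟩
  have := PySem.Int.floordiv_mul_add_mod n e
  rw [he3, he4] at this
  linarith

theorem pairwise_larges_aux (n : Int) (k : Nat) : ∀ i : Int, (n + 1 - i).toNat ≤ k → 1 ≤ i →
    (larges n i).Pairwise (· > ·) := by
  induction k with
  | zero =>
    intro i hk hi
    have hg : ¬ (1 ≤ i ∧ i * i ≤ n) := by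
      rintro ⟨h1, h2⟩
      have : i ≤ n := by nlinarith
      omega
    rw [larges, dif_neg hg]
    exact List.Pairwise.nil
  | succ k ih =>
    intro i hk hi
    rw [larges]
    by_cases hg : 1 ≤ i ∧ i * i ≤ n
    · have hmeas : (n + 1 - (i + 1)).toNat ≤ k := by
        have : i ≤ n := by nlinarith [hg.1, hg.2]
        omega
      rw [dif_pos hg]
      have IH := ih (i + 1) hmeas (by omega)
      by_cases hc : PySem.Int.mod n i = 0 ∧ PySem.Int.floordiv n i ≠ i ∧ PySem.Int.floordiv n i ≠ n
      · rw [if_pos hc]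
        refine List.pairwise_cons.mpr ⟨?_, IH⟩
        intro d hd
        obtain ⟨e, he1, he2, he3, he4, he5⟩ := larges_fact (by omega : (1:Int) ≤ i + 1) hd
        -- head j = n // i with j * i = n; tail element d with d * e = n, e ≥ i + 1
        have hji : PySem.Int.floordiv n i * i = n := by
          have := PySem.Int.floordiv_mul_add_mod n i
          rw [hc.1] at this
          linarith
        have hn1 : 1 ≤ n := by nlinarith [hg.1, hg.2]
        have hjpos : 1 ≤ PySem.Int.floordiv n i := by nlinarith [hg.1]
        have hepos : 1 ≤ e := by omega
        have hdpos : 1 ≤ d := by nlinarith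
        nlinarith [hg.1]
      · rw [if_neg hc]; exact IH
    · rw [dif_neg hg]; exact List.Pairwise.nil

theorem pairwise_larges (n i : Int) (hi : 1 ≤ i) : (larges n i).Pairwise (· > ·) :=
  pairwise_larges_aux n (n + 1 - i).toNat i le_rfl hi

theorem mem1_lemma (n d : Int) :
    d ∈ List.filter (fun i => decide (PySem.Int.mod n i = 0)) (PySem.List.pyRange 1 n 1) ↔
      1 ≤ d ∧ d < n ∧ PySem.Int.mod n d = 0 := by
  simp only [List.mem_filter, PySem.List.mem_pyRange_one, decide_eq_true_eq]
  tauto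

theorem mem2_lemma (n d : Int) (hn2 : 2 ≤ n) :
    d ∈ smalls n 1 ++ (larges n 1).reverse ↔ 1 ≤ d ∧ d < n ∧ PySem.Int.mod n d = 0 := by
  rw [List.mem_append, List.mem_reverse, mem_smalls le_rfl, mem_larges le_rfl]
  constructor
  · rintro (⟨h1, h2, h3⟩ | ⟨e, he1, he2, he3, he4, he5, he6⟩)
    · refine ⟨h1, ?_, h3⟩
      nlinarith
    · have hde : d * e = n := by
        have := PySem.Int.floordiv_mul_add_mod n e
        rw [he3, he4] at this
        linarith
      have hd1 : 1 ≤ d := by nlinarith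
      have hdn : d ≤ n := by nlinarith
      refine ⟨hd1, lt_of_le_of_ne hdn he6, ?_⟩
      rw [PySem.Int.mod_eq_zero_iff_dvd]
      exact ⟨e, by linarith⟩
  · rintro ⟨h1, h2, h3⟩
    by_cases hs : d * d ≤ n
    · exact Or.inl ⟨h1, hs, h3⟩
    · right
      push Not at hs
      have hed : PySem.Int.floordiv n d * d = n := by
        have := PySem.Int.floordiv_mul_add_mod n d
        rw [h3] at this
        linarith
      set e := PySem.Int.floordiv n d with hedef
      have he1 : 1 ≤ e := by nlinarith
      have hed2 : e < d := by nlinarith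
      refine ⟨e, he1, by nlinarith, ?_, ?_, by omega, by omega⟩
      · rw [PySem.Int.mod_eq_zero_iff_dvd]
        exact ⟨d, by linarith⟩
      · rw [PySem.Int.floordiv_eq_iff_of_pos (by omega)]
        constructor <;> nlinarith

theorem pairwise_B (n : Int) : (smalls n 1 ++ (larges n 1).reverse).Pairwise (· < ·) := by
  rw [List.pairwise_append]
  refine ⟨pairwise_smalls n 1 le_rfl, ?_, ?_⟩
  · rw [List.pairwise_reverse]
    exact pairwise_larges n 1 le_rfl
  · intro s hs l hl
    rw [List.mem_reverse] at hl
    obtain ⟨hs1, hs2, hs3⟩ := (mem_smalls le_rfl).mp hs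
    obtain ⟨e, he1, he2, he3, he4, he5⟩ := larges_fact le_rfl hl
    have hl1 : 1 ≤ l := by nlinarith
    have hle : e < l := by
      rcases lt_or_eq_of_le (by nlinarith : e ≤ l) with h | h
      · exact h
      · exact absurd h.symm he4
    nlinarith

-- ===== VERDICT (by name: the statement is the Claim_ definition above) =====
theorem allFactor_spec : Claim_equal_allFactor := by
  intro n _
  show allFactor n = allFactor_alt n
  have hA : allFactor n =
      List.filter (fun i => decide (PySem.Int.mod n i = 0)) (PySem.List.pyRange 1 n 1) := by
    unfold allFactor
    rw [PySem.List.foldl_append_ite_eq_filter]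
    simp
  by_cases hn : n ≤ 1
  · rw [hA, allFactor_alt, if_pos hn, PySem.List.pyRange_one_eq_nil hn]
    simp
  · push Not at hn
    have hn2 : 2 ≤ n := by omega
    rw [hA, allFactor_alt, if_neg (by omega), allFactorLoop_eq]
    simp only [List.nil_append]
    have hp1 : (List.filter (fun i => decide (PySem.Int.mod n i = 0))
        (PySem.List.pyRange 1 n 1)).Pairwise (· < ·) :=
      (PySem.List.pairwise_lt_pyRange_one 1 n).filter _
    have hp2 := pairwise_B n
    have nd1 : (List.filter (fun i => decide (PySem.Int.mod n i = 0))
        (PySem.List.pyRange 1 n 1)).Nodup := hp1.imp (fun h => ne_of_lt h)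
    have nd2 : (smalls n 1 ++ (larges n 1).reverse).Nodup := hp2.imp (fun h => ne_of_lt h)
    have hperm := (List.perm_ext_iff_of_nodup nd1 nd2).mpr
      (fun d => (mem1_lemma n d).trans (mem2_lemma n d hn2).symm)
    exact hperm.eq_of_pairwise (fun a b _ _ hab hba => absurd hba (not_lt.mpr hab.le)) hp1 hp2
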